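-- pv_equiv track=rewrite | github.com/quicophy/mdopt | mpopt/canonical/LDPC_params_results/params_batch_set.py | gen_dict_from_lists
-- ===== SOURCE A (Python) =====
-- import copy
--
-- def gen_dict_from_lists(large_file, params_lists):
--     '''
--     Generates a dictionnary for each sub list of parameters using the original
--     ''large file''. Returns a list of all these dictionnaries.
--     '''
--     full_dicts = []
--     for par_list in params_lists:
--         # Creates a copy of the original largefile.
--         dump = copy.deepcopy(large_file)
--         iter = 0
--         # Replaces each param value list by a single value specific to one
--         # experiment. Then appends it to the list of dictionnaries.
--         for sub_dic in dump:
--             for dict_param in dump[sub_dic]: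
--                 dump[sub_dic][dict_param] = par_list[iter]
--                 iter += 1
--         full_dicts.append(dump)
--
--     return full_dicts
-- ===== SOURCE B (Python) =====
-- def gen_dict_from_lists(large_file, params_lists):
--     '''
--     Same result as A, but without copy.deepcopy: index the template once into a
--     flat schema (outer key, starting offset, inner keys), then build each output
--     dict fresh by pure comprehensions indexing par_list at precomputed offsets.
--     '''
--     schema = []
--     pos = 0
--     for outer in large_file:
--         schema.append((outer, pos, list(large_file[outer])))
--         pos += len(large_file[outer])
--     return [
--         {outer: {key: par_list[start + j] for j, key in enumerate(keys)}
--          for outer, start, keys in schema}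
--         for par_list in params_lists
--     ]
-- ===== Notes on version B (the rewrite author's own statement) =====
-- stated objective: alternative
-- what changed: A deep-copies the whole template for every parameter list and mutates it in place with a running counter; B indexes the template once into a flat schema of (outer key, offset, inner keys) and builds each output dict fresh by comprehensions indexing par_list at precomputed offsets, with no deepcopy and no mutation.
import Mathlib
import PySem

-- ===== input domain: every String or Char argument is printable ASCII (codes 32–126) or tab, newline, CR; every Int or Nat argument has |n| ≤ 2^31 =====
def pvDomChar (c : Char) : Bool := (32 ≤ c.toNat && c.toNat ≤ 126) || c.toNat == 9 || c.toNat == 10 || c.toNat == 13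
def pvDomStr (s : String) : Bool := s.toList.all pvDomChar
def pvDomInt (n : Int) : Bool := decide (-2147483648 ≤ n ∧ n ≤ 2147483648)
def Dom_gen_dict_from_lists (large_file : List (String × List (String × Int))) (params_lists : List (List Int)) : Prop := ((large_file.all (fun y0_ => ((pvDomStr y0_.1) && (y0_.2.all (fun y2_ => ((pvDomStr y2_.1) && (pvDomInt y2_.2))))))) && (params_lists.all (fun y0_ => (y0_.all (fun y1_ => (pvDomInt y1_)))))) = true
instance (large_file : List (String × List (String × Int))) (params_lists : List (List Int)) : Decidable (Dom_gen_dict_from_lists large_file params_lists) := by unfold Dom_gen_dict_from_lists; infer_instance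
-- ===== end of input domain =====

-- B replaces A's per-list deepcopy-and-mutate with a one-pass offset schema plus fresh construction (objective: alternative decomposition, no deepcopy/mutation).

-- ===== PORT A =====
-- Transliteration of A: for each par_list, copy the template dict (a pure value here, so
-- the copy is the value itself) and walk its items in insertion order, overwriting each
-- inner value with par_list[iter]; assignment to an existing dict key keeps its position,
-- so under Pre_'s unique keys the in-place overwrites rebuild the association list in order.
-- par_list[iter] is PySem.List.pyGetD (IndexError excluded by Pre_).
def gen_dict_from_lists (large_file : List (String × List (String × Int))) (params_lists : List (List Int)) : List (List (String × List (String × Int))) :=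
  params_lists.foldl (fun full_dicts par_list =>
    -- dump = copy.deepcopy(large_file); iter = 0
    let st := large_file.foldl (fun (st : List (String × List (String × Int)) × Int) sub_dic =>
        let st2 := sub_dic.2.foldl (fun (st2 : List (String × Int) × Int) dict_param =>
            (st2.1 ++ [(dict_param.1, PySem.List.pyGetD par_list st2.2 0)], st2.2 + 1))
          ([], st.2)
        (st.1 ++ [(sub_dic.1, st2.1)], st2.2))
      ([], 0)
    full_dicts ++ [st.1]) []

-- ===== PORT B =====
-- Transliteration of Source B: build the flat schema [(outer, pos, inner-keys)] once, then
-- one nested dict comprehension per par_list (dicts via PySem.Dict.ofList, exact for the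
-- comprehension's overwrite semantics); par_list[start + j] is PySem.List.pyGetD.
def gen_dict_from_lists_alt (large_file : List (String × List (String × Int))) (params_lists : List (List Int)) : List (List (String × List (String × Int))) :=
  let schema := (large_file.foldl (fun (st : List (String × Int × List String) × Int) kv =>
      (st.1 ++ [(kv.1, st.2, kv.2.map (·.1))], st.2 + PySem.List.len kv.2)) ([], 0)).1
  params_lists.map (fun par_list =>
    (PySem.Dict.ofList (schema.map (fun e =>
      (e.1, (PySem.Dict.ofList ((PySem.List.enumerate e.2.2).map
              (fun jk => (jk.2, PySem.List.pyGetD par_list (e.2.1 + jk.1) 0))) : PySem.Dict String Int).items)))).items)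

-- ===== PRECONDITION & SPEC =====
-- Pre_ excludes (a) parameter lists with fewer entries than the template has inner keys —
-- there A raises IndexError — and (b) association lists with duplicate outer keys or
-- duplicate inner keys within one sub-dict, which do not represent any Python dict input
-- (a Python dict cannot hold duplicate keys; both Pythons see the merged dict there).
def Pre_gen_dict_from_lists (large_file : List (String × List (String × Int))) (params_lists : List (List Int)) : Prop :=
  (large_file.map (·.1)).Nodup ∧
  (∀ kv ∈ large_file, (kv.2.map (·.1)).Nodup) ∧
  (∀ pl ∈ params_lists, (large_file.map (fun kv => kv.2.length)).sum ≤ pl.length)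
instance (large_file : List (String × List (String × Int))) (params_lists : List (List Int)) : Decidable (Pre_gen_dict_from_lists large_file params_lists) := by unfold Pre_gen_dict_from_lists; infer_instance

def pvWitness_gen_dict_from_lists : (List (String × List (String × Int))) × List (List Int) :=
  ([("a", [("x", 0), ("y", 1)]), ("b", [("z", 2)])], [[7, 8, 9], [4, 5, 6]])

def Spec_gen_dict_from_lists (large_file : List (String × List (String × Int))) (params_lists : List (List Int)) (out : List (List (String × List (String × Int)))) : Prop := out = gen_dict_from_lists_alt large_file params_lists
instance (large_file : List (String × List (String × Int))) (params_lists : List (List Int)) (out : List (List (String × List (String × Int)))) : Decidable (Spec_gen_dict_from_lists large_file params_lists out) := by unfold Spec_gen_dict_from_lists; infer_instance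

-- ===== CLAIM (what is proved, stated in full; the proofs are below) =====
def Claim_equal_gen_dict_from_lists : Prop := ∀ (large_file : List (String × List (String × Int))) (params_lists : List (List Int)), Dom_gen_dict_from_lists large_file params_lists → Pre_gen_dict_from_lists large_file params_lists → Spec_gen_dict_from_lists large_file params_lists (gen_dict_from_lists large_file params_lists)

-- ===== LEMMAS AND PROOFS =====

-- Common specification of one filled output: inner keys get consecutive parameter indices
-- starting at s; outer entries advance s by the sub-dict size.
def pvFillInner (pl : List Int) : List String → Int → List (String × Int)
  | [], _ => []
  | k :: t, s => (k, PySem.List.pyGetD pl s 0) :: pvFillInner pl t (s + 1)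

def pvFillOuter (pl : List Int) : List (String × List (String × Int)) → Int → List (String × List (String × Int))
  | [], _ => []
  | (k, sub) :: rest, s => (k, pvFillInner pl (sub.map (·.1)) s) :: pvFillOuter pl rest (s + sub.length)

-- B's schema, recursively.
def pvSchemaOf : List (String × List (String × Int)) → Int → List (String × Int × List String)
  | [], _ => []
  | (k, sub) :: rest, s => (k, s, sub.map (·.1)) :: pvSchemaOf rest (s + sub.length)

lemma pvA_inner (pl : List Int) (sub : List (String × Int)) (acc : List (String × Int)) (s : Int) :
    sub.foldl (fun (st2 : List (String × Int) × Int) dict_param =>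
        (st2.1 ++ [(dict_param.1, PySem.List.pyGetD pl st2.2 0)], st2.2 + 1)) (acc, s)
      = (acc ++ pvFillInner pl (sub.map (·.1)) s, s + sub.length) := by
  induction sub generalizing acc s with
  | nil => simp [pvFillInner]
  | cons x t ih =>
      simp only [List.foldl_cons, List.map_cons, pvFillInner, ih, Prod.mk.injEq]
      refine ⟨by simp, by push_cast [List.length_cons]; omega⟩

lemma pvA_outer (pl : List Int) (lf : List (String × List (String × Int)))
    (acc : List (String × List (String × Int))) (s : Int) :
    lf.foldl (fun (st : List (String × List (String × Int)) × Int) sub_dic =>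
        let st2 := sub_dic.2.foldl (fun (st2 : List (String × Int) × Int) dict_param =>
            (st2.1 ++ [(dict_param.1, PySem.List.pyGetD pl st2.2 0)], st2.2 + 1))
          ([], st.2)
        (st.1 ++ [(sub_dic.1, st2.1)], st2.2)) (acc, s)
      = (acc ++ pvFillOuter pl lf s, s + ((lf.map (fun kv => kv.2.length)).sum : Int)) := by
  induction lf generalizing acc s with
  | nil => simp [pvFillOuter]
  | cons x rest ih =>
      obtain ⟨k, sub⟩ := x
      simp only [List.foldl_cons]
      rw [pvA_inner pl sub [] s, ih]
      simp only [pvFillOuter, Prod.mk.injEq, List.nil_append, List.map_cons, List.sum_cons]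
      refine ⟨by simp, by omega⟩

lemma pvB_schema (lf : List (String × List (String × Int)))
    (acc : List (String × Int × List String)) (s : Int) :
    lf.foldl (fun (st : List (String × Int × List String) × Int) kv =>
        (st.1 ++ [(kv.1, st.2, kv.2.map (·.1))], st.2 + PySem.List.len kv.2)) (acc, s)
      = (acc ++ pvSchemaOf lf s, s + ((lf.map (fun kv => kv.2.length)).sum : Int)) := by
  induction lf generalizing acc s with
  | nil => simp [pvSchemaOf]
  | cons x rest ih =>
      obtain ⟨k, sub⟩ := x
      simp only [List.foldl_cons]
      rw [ih]
      simp only [pvSchemaOf, Prod.mk.injEq, List.map_cons, List.sum_cons, PySem.List.len_eq]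
      refine ⟨by simp, by omega⟩

-- A dict comprehension over distinct keys is its own association list.
lemma pvItems_ofList_nodup {ν : Type} (l : List (String × ν)) (h : (l.map (·.1)).Nodup) :
    (PySem.Dict.ofList l).items = l := by
  have := PySem.Dict.items_foldl_insert_fresh l Prod.fst Prod.snd PySem.Dict.empty
    (by intro a _; simp [pysem]) h
  simpa [PySem.Dict.ofList, PySem.Dict.update] using this

lemma pvB_inner (pl : List Int) (ks : List String) (s t : Int) :
    (PySem.List.enumerate ks t).map (fun jk => (jk.2, PySem.List.pyGetD pl (s + jk.1) 0))
      = pvFillInner pl ks (s + t) := by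
  induction ks generalizing t with
  | nil => simp [pvFillInner, PySem.List.enumerate]
  | cons k rest ih =>
      rw [PySem.List.enumerate_cons]
      simp only [List.map_cons, pvFillInner, ih]
      have h1 : s + (t + 1) = s + t + 1 := by ring
      rw [h1]

lemma pvB_fill (pl : List Int) (lf : List (String × List (String × Int))) (s : Int)
    (hin : ∀ kv ∈ lf, (kv.2.map (·.1)).Nodup) :
    (pvSchemaOf lf s).map (fun e =>
        (e.1, (PySem.Dict.ofList ((PySem.List.enumerate e.2.2).map
            (fun jk => (jk.2, PySem.List.pyGetD pl (e.2.1 + jk.1) 0))) : PySem.Dict String Int).items))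
      = pvFillOuter pl lf s := by
  induction lf generalizing s with
  | nil => simp [pvSchemaOf, pvFillOuter]
  | cons x rest ih =>
      obtain ⟨k, sub⟩ := x
      simp only [pvSchemaOf, List.map_cons, pvFillOuter, List.cons.injEq]
      refine ⟨?_, ih (s + sub.length) (fun kv hkv => hin kv (List.mem_cons_of_mem _ hkv))⟩
      refine congrArg (Prod.mk k) ?_
      have hnk : (((PySem.List.enumerate (sub.map (·.1)) 0).map
          (fun jk => (jk.2, PySem.List.pyGetD pl (s + jk.1) 0))).map (·.1)).Nodup := by
        rw [List.map_map]
        have hc : (PySem.List.enumerate (sub.map (·.1)) 0).map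
            ((·.1) ∘ (fun jk => (jk.2, PySem.List.pyGetD pl (s + jk.1) 0)))
            = (PySem.List.enumerate (sub.map (·.1)) 0).map (·.2) := rfl
        rw [hc, PySem.List.map_snd_enumerate]
        exact hin (k, sub) List.mem_cons_self
      rw [pvItems_ofList_nodup _ hnk]
      simpa using pvB_inner pl (sub.map (·.1)) s 0

lemma pvSchemaOf_keys (lf : List (String × List (String × Int))) (s : Int) :
    (pvSchemaOf lf s).map (fun e => e.1) = lf.map (·.1) := by
  induction lf generalizing s with
  | nil => simp [pvSchemaOf]
  | cons x rest ih => obtain ⟨k, sub⟩ := x; simp [pvSchemaOf, ih]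

-- ===== VERDICT (by name: the statement is the Claim_ definition above) =====
theorem gen_dict_from_lists_spec : Claim_equal_gen_dict_from_lists := by
  intro lf pls _hdom hpre
  unfold Spec_gen_dict_from_lists gen_dict_from_lists gen_dict_from_lists_alt
  obtain ⟨hno, hin, _hlen⟩ := hpre
  rw [PySem.List.foldl_append_singleton_eq_map]
  rw [pvB_schema lf [] 0]
  simp only [List.nil_append]
  apply List.map_congr_left
  intro pl _
  rw [pvA_outer pl lf [] 0]
  simp only [List.nil_append]
  have hkeys : ((pvSchemaOf lf 0).map (fun e =>
      (e.1, (PySem.Dict.ofList ((PySem.List.enumerate e.2.2).map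
          (fun jk => (jk.2, PySem.List.pyGetD pl (e.2.1 + jk.1) 0))) : PySem.Dict String Int).items))).map (·.1)
      = lf.map (·.1) := by
    rw [List.map_map]
    simpa [Function.comp_def] using pvSchemaOf_keys lf 0
  rw [pvItems_ofList_nodup _ (hkeys ▸ hno)]
  exact (pvB_fill pl lf 0 hin).symm
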